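-- pv_equiv track=rewrite | github.com/aljazvaupotic/AOC | 2024/aoc24_05.py | is_update_valid
-- ===== SOURCE A (Python) =====
-- from collections import defaultdict, deque
--
-- def is_update_valid(update, graph):
--     """Check if an update satisfies the ordering rules."""
--     # Build a set of pages in the current update
--     pages_in_update = set(update)
--
--     # Filter the graph to only include relevant rules
--     filtered_graph = {x: [y for y in graph[x] if y in pages_in_update] for x in pages_in_update}
--
--     # Topological sort to check if ordering is valid
--     in_degree = {page: 0 for page in pages_in_update}
--     for x in filtered_graph:
--         for y in filtered_graph[x]:
--             in_degree[y] += 1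
--
--     # Perform topological sorting
--     queue = deque([node for node in pages_in_update if in_degree[node] == 0])
--     sorted_pages = []
--
--     while queue:
--         current = queue.popleft()
--         sorted_pages.append(current)
--         for neighbor in filtered_graph[current]:
--             in_degree[neighbor] -= 1
--             if in_degree[neighbor] == 0:
--                 queue.append(neighbor)
--
--     # If sorted_pages contains all pages, the update is valid
--     return len(sorted_pages) == len(pages_in_update)
-- ===== SOURCE B (Python) =====
-- def is_update_valid(update, graph):
--     """Check if an update satisfies the ordering rules.
--
--     Cycle test by repeatedly peeling off, in rounds, every page that currently
--     has no predecessor among the surviving pages; valid iff everything peels.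
--     """
--     pages = set(update)
--     preds = {x: [] for x in pages}
--     for y in pages:
--         for x in graph[y]:
--             if x in pages:
--                 preds[x].append(y)
--     remaining = set(pages)
--     while remaining:
--         survivors = {x for x in remaining if any(y in remaining for y in preds[x])}
--         if len(survivors) == len(remaining):
--             return False
--         remaining = survivors
--     return True
-- ===== Notes on version B (the rewrite author's own statement) =====
-- stated objective: alternative
-- what changed: Replaces Kahn's topological sort (per-node in-degree counters maintained incrementally and a FIFO queue of zero-in-degree nodes) by a fixpoint computation: build a predecessor map once, then repeatedly delete, in whole rounds, every page with no surviving predecessor; the update is valid iff the set empties.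
import Mathlib
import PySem

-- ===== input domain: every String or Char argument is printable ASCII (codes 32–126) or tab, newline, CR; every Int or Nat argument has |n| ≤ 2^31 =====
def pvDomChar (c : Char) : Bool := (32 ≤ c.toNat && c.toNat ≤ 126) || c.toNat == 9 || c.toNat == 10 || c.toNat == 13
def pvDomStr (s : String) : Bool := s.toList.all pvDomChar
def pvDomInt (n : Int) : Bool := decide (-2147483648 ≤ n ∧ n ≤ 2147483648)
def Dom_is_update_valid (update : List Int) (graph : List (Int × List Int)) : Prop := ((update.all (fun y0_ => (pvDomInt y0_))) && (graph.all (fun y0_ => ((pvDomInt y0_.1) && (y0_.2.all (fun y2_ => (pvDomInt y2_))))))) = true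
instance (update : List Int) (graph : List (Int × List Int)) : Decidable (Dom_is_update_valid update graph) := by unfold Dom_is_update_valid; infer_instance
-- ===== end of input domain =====

-- B replaces A's queue-driven Kahn peeling (in-degree counters + FIFO queue) by round-based
-- simultaneous removal of all current sources over a predecessor map (objective: alternative).

-- ===== PORT A =====
-- termination measure for A's "while queue" loop (helper, cited in decreasing_by)
def kahnMu (d : PySem.Dict Int Int) : Nat :=
  ((PySem.Set.ofList d.keys).map (fun k => (d.getD k 0).toNat)).sum

theorem kahnMu_insert (d : PySem.Dict Int Int) (k : Int) :
    kahnMu (d.insert k (d.getD k 0 - 1)) +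
      (if (d.getD k 0 - 1) == 0 then 1 else 0) ≤ kahnMu d := by
  by_cases hc : d.contains k = true
  · have hkeys := PySem.Dict.keys_insert_of_contains d (v := d.getD k 0 - 1) hc
    have hkmem : k ∈ d.keys := by
      have h2 := PySem.Dict.contains_eq_decide_mem_keys d k
      rw [hc] at h2; exact of_decide_eq_true h2.symm
    have hnd : (PySem.Set.ofList d.keys).Nodup := PySem.Set.nodup_ofList _
    have hkS : k ∈ PySem.Set.ofList d.keys := (PySem.Set.mem_ofList _ _).mpr hkmem
    have hperm := List.perm_cons_erase hkS
    have hsum : ∀ (f : Int → Nat), ((PySem.Set.ofList d.keys).map f).sum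
        = f k + (((PySem.Set.ofList d.keys).erase k).map f).sum := by
      intro f
      have h3 := (hperm.map f).sum_eq
      simpa using h3
    have e1 : kahnMu d = (d.getD k 0).toNat +
        (((PySem.Set.ofList d.keys).erase k).map (fun j => (d.getD j 0).toNat)).sum := hsum _
    have e2 : kahnMu (d.insert k (d.getD k 0 - 1)) =
        (d.getD k 0 - 1).toNat +
        (((PySem.Set.ofList d.keys).erase k).map (fun j => (d.getD j 0).toNat)).sum := by
      unfold kahnMu
      rw [hkeys, hsum]
      congr 1
      · rw [PySem.Dict.getD_insert]; simp
      · congr 1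
        apply List.map_congr_left
        intro j hj
        have hne : j ≠ k := ((hnd.mem_erase_iff).mp hj).1
        rw [PySem.Dict.getD_insert]; simp [hne]
    rw [e1, e2]
    simp only [beq_iff_eq]
    split <;> omega
  · have hc' : d.contains k = false := by simpa using hc
    have hkeys := PySem.Dict.keys_insert_of_not_contains d (v := d.getD k 0 - 1) hc'
    have hget : d.getD k 0 = 0 := PySem.Dict.getD_of_not_contains d 0 hc'
    have hkmem : k ∉ d.keys := by
      have h2 := PySem.Dict.contains_eq_decide_mem_keys d k
      rw [hc'] at h2
      exact of_decide_eq_false h2.symm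
    have hkS : k ∉ PySem.Set.ofList d.keys := fun h => hkmem ((PySem.Set.mem_ofList _ _).mp h)
    have hofl : PySem.Set.ofList (d.keys ++ [k]) = PySem.Set.ofList d.keys ++ [k] := by
      rw [PySem.Set.ofList_append_singleton, PySem.Set.add_of_not_mem hkS]
    have e2 : kahnMu (d.insert k (d.getD k 0 - 1)) = kahnMu d := by
      unfold kahnMu
      rw [hkeys, hofl, List.map_append, List.sum_append]
      have hlast : ((d.insert k (d.getD k 0 - 1)).getD k 0).toNat = 0 := by
        rw [PySem.Dict.getD_insert]; simp [hget]
      simp only [List.map_cons, List.map_nil, List.sum_cons, List.sum_nil, hlast]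
      have : ∀ j ∈ PySem.Set.ofList d.keys,
          ((d.insert k (d.getD k 0 - 1)).getD j 0).toNat = (d.getD j 0).toNat := by
        intro j hj
        have hne : j ≠ k := fun h => hkS (h ▸ hj)
        rw [PySem.Dict.getD_insert]; simp [hne]
      rw [List.map_congr_left this]
      omega
    rw [e2, hget]
    simp

-- the body of A's "for neighbor in filtered_graph[current]" loop (decrement + conditional enqueue)
def kahnStep (d : PySem.Dict Int Int) (q : List Int) (ns : List Int) :
    PySem.Dict Int Int × List Int :=
  ns.foldl (fun st nb =>
    let v := st.1.getD nb 0 - 1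
    (st.1.insert nb v, if v == 0 then st.2 ++ [nb] else st.2)) (d, q)

theorem kahnStep_mu (ns : List Int) : ∀ (d : PySem.Dict Int Int) (q : List Int),
    kahnMu (kahnStep d q ns).1 + (kahnStep d q ns).2.length ≤ kahnMu d + q.length := by
  induction ns with
  | nil => intro d q; simp [kahnStep]
  | cons nb ns ih =>
    intro d q
    have hstep : kahnStep d q (nb :: ns) =
        kahnStep (d.insert nb (d.getD nb 0 - 1))
          (if (d.getD nb 0 - 1) == 0 then q ++ [nb] else q) ns := rfl
    rw [hstep]
    have h1 := ih (d.insert nb (d.getD nb 0 - 1)) (if (d.getD nb 0 - 1) == 0 then q ++ [nb] else q)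
    have h2 := kahnMu_insert d nb
    have hlen : (if (d.getD nb 0 - 1) == 0 then q ++ [nb] else q).length
        = q.length + (if (d.getD nb 0 - 1) == 0 then 1 else 0) := by
      split <;> simp
    rw [hlen] at h1
    omega

-- A's "while queue" loop
def kahnLoop (fg : PySem.Dict Int (List Int)) (queue : List Int)
    (indeg : PySem.Dict Int Int) (sorted : List Int) : List Int :=
  match queue with
  | [] => sorted
  | current :: rest =>
    let st := kahnStep indeg rest (fg.getD current [])
    kahnLoop fg st.2 st.1 (sorted ++ [current])
termination_by kahnMu indeg + queue.length
decreasing_by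
  have h := kahnStep_mu (fg.getD current []) indeg rest
  simp only [List.length_cons]
  omega

def is_update_valid (update : List Int) (graph : List (Int × List Int)) : Bool :=
  let pages := PySem.Set.ofList update
  let g := PySem.Dict.mk graph
  let filtered_graph := pages.foldl
    (fun d x => d.insert x ((g.getD x []).filter (fun y => PySem.Set.contains pages y)))
    PySem.Dict.empty
  let in_degree0 := pages.foldl (fun d p => d.insert p (0 : Int)) PySem.Dict.empty
  let in_degree := filtered_graph.keys.foldl
    (fun d x => (filtered_graph.getD x []).foldl (fun d y => d.insert y (d.getD y 0 + 1)) d)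
    in_degree0
  let queue := pages.filter (fun node => in_degree.getD node 0 == 0)
  let sorted_pages := kahnLoop filtered_graph queue in_degree []
  sorted_pages.length == pages.length

-- ===== PORT B =====
-- B's "while remaining" loop: drop every page with no surviving predecessor, in rounds
def peelLoop (preds : PySem.Dict Int (List Int)) (remaining : List Int) : Bool :=
  if remaining.isEmpty then true
  else
    let survivors := remaining.filter
      (fun x => (preds.getD x []).any (fun y => remaining.contains y))
    if h : survivors.length = remaining.length then false
    else peelLoop preds survivors
termination_by remaining.length
decreasing_by
  refine Nat.lt_of_le_of_ne ?_ h
  simpa using List.length_filter_le (fun x => (preds.getD x []).any fun y => decide (y ∈ remaining)) remaining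

def is_update_valid_alt (update : List Int) (graph : List (Int × List Int)) : Bool :=
  let pages := PySem.Set.ofList update
  let g := PySem.Dict.mk graph
  let preds0 := pages.foldl (fun d x => d.insert x ([] : List Int)) PySem.Dict.empty
  let preds := pages.foldl
    (fun d y => (g.getD y []).foldl
      (fun d x => if PySem.Set.contains pages x then d.modify x [] (· ++ [y]) else d) d)
    preds0
  peelLoop preds pages

-- ===== PRECONDITION & SPEC =====
-- Pre_ excludes exactly the inputs on which the Python raises: some page of `update`
-- is not a key of `graph`, so `graph[x]` raises KeyError (in A and in B alike).
def Pre_is_update_valid (update : List Int) (graph : List (Int × List Int)) : Prop :=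
  ∀ p ∈ update, ((PySem.Dict.mk graph).get? p).isSome = true
instance (update : List Int) (graph : List (Int × List Int)) :
    Decidable (Pre_is_update_valid update graph) := by unfold Pre_is_update_valid; infer_instance

def pvWitness_is_update_valid : List Int × (List (Int × List Int)) :=
  ([1, 2, 3], [(1, [2]), (2, [3]), (3, [])])

def Spec_is_update_valid (update : List Int) (graph : List (Int × List Int)) (out : Bool) : Prop := out = is_update_valid_alt update graph
instance (update : List Int) (graph : List (Int × List Int)) (out : Bool) : Decidable (Spec_is_update_valid update graph out) := by unfold Spec_is_update_valid; infer_instance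

-- ===== CLAIM (what is proved, stated in full; the proofs are below) =====
def Claim_equal_is_update_valid : Prop := ∀ (update : List Int) (graph : List (Int × List Int)), Dom_is_update_valid update graph → Pre_is_update_valid update graph → Spec_is_update_valid update graph (is_update_valid update graph)

-- ===== LEMMAS AND PROOFS =====

theorem kahnStep_getD (ns : List Int) : ∀ (d : PySem.Dict Int Int) (q : List Int) (p : Int),
    (kahnStep d q ns).1.getD p 0 = d.getD p 0 - (ns.count p : Int) := by
  induction ns with
  | nil => intro d q p; simp [kahnStep]
  | cons nb ns ih =>
    intro d q p
    have hstep : kahnStep d q (nb :: ns) =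
        kahnStep (d.insert nb (d.getD nb 0 - 1))
          (if (d.getD nb 0 - 1) == 0 then q ++ [nb] else q) ns := rfl
    rw [hstep, ih]
    rw [PySem.Dict.getD_insert]
    by_cases hp : p = nb
    · subst hp; simp; omega
    · simp [hp, Ne.symm hp]

theorem kahnStep_count (ns : List Int) : ∀ (d : PySem.Dict Int Int) (q : List Int) (p : Int),
    (kahnStep d q ns).2.count p = q.count p +
      (if 1 ≤ d.getD p 0 ∧ d.getD p 0 ≤ (ns.count p : Int) then 1 else 0) := by
  induction ns with
  | nil => intro d q p; simp [kahnStep]; omega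
  | cons nb ns ih =>
    intro d q p
    have hstep : kahnStep d q (nb :: ns) =
        kahnStep (d.insert nb (d.getD nb 0 - 1))
          (if (d.getD nb 0 - 1) == 0 then q ++ [nb] else q) ns := rfl
    rw [hstep, ih]
    rw [PySem.Dict.getD_insert]
    by_cases hp : p = nb
    · subst hp
      rw [if_pos rfl]
      simp only [List.count_cons_self, beq_iff_eq]
      by_cases h0 : d.getD p 0 - 1 = 0
      · rw [if_pos h0]
        simp only [List.count_append, List.count_singleton_self]
        push_cast
        split_ifs <;> omega
      · rw [if_neg h0]
        push_cast
        split_ifs <;> omega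
    · have hne : (p = nb) = False := by simp [hp]
      simp only [hne, if_false]
      have hcount : (nb :: ns).count p = ns.count p := by
        rw [List.count_cons]; simp [Ne.symm hp]
      rw [hcount]
      congr 1
      split <;> simp [List.count_append, Ne.symm hp]

def WF (pages : List Int) (F : Int → List Int) (sorted : List Int) (p : Int) : Nat :=
  ((pages.filter (fun x => !sorted.contains x)).map (fun x => (F x).count p)).sum

theorem WF_step (pages : List Int) (F : Int → List Int) (sorted : List Int) (current : Int)
    (hnp : pages.Nodup) (hc : current ∈ pages) (hs : current ∉ sorted) (p : Int) :
    WF pages F sorted p = WF pages F (sorted ++ [current]) p + (F current).count p := by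
  unfold WF
  have hfil : pages.filter (fun x => !(sorted ++ [current]).contains x)
      = (pages.filter (fun x => !sorted.contains x)).filter (fun x => !(x == current)) := by
    rw [List.filter_filter]
    apply List.filter_congr
    intro x _
    simp [beq_iff_eq, Bool.and_comm, beq_eq_decide]
  rw [hfil]
  have hL : (pages.filter (fun x => !sorted.contains x)).Nodup := hnp.filter _
  have hcur : current ∈ pages.filter (fun x => !sorted.contains x) := by
    simp [List.mem_filter, hc, hs]
  have herase : (pages.filter (fun x => !sorted.contains x)).filter (fun x => !(x == current))
      = (pages.filter (fun x => !sorted.contains x)).erase current := by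
    rw [List.Nodup.erase_eq_filter hL]
    apply List.filter_congr
    intro x _
    simp [bne]
  rw [herase]
  have hperm := List.perm_cons_erase hcur
  have h2 := (hperm.map (fun x => (F x).count p)).sum_eq
  simp only [List.map_cons, List.sum_cons] at h2
  omega

theorem WF_zero (pages : List Int) (F : Int → List Int) (sorted : List Int) (p : Int)
    (h : WF pages F sorted p = 0) (y : Int) (hy : y ∈ pages) (hys : y ∉ sorted) :
    p ∉ F y := by
  intro hpf
  unfold WF at h
  rw [List.sum_eq_zero_iff] at h
  have hmem : (F y).count p ∈ (pages.filter (fun x => !sorted.contains x)).map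
      (fun x => (F x).count p) :=
    List.mem_map_of_mem (by simp [List.mem_filter, hy, hys])
  have := h _ hmem
  rw [List.count_eq_zero] at this
  exact this hpf

theorem append_singleton_eq_append_cons {α : Type} {l pre post : List α} {a x : α}
    (h : l ++ [a] = pre ++ x :: post) :
    (pre = l ∧ x = a ∧ post = []) ∨ ∃ post', post = post' ++ [a] ∧ l = pre ++ x :: post' := by
  rcases List.eq_nil_or_concat post with rfl | ⟨post', b, rfl⟩
  · left
    have h2 := List.append_inj' h (by simp)
    exact ⟨h2.1.symm, by simpa using h2.2.symm, rfl⟩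
  · right
    rw [List.concat_eq_append] at *
    have h3 : l ++ [a] = (pre ++ x :: post') ++ [b] := by simpa using h
    have h2 := List.append_inj' h3 (by simp)
    exact ⟨post', by simp [(by simpa using h2.2 : a = b)], h2.1⟩

structure KahnInv (pages : List Int) (F : Int → List Int) (queue : List Int)
    (indeg : PySem.Dict Int Int) (sorted : List Int) : Prop where
  nodupS : sorted.Nodup
  nodupQ : queue.Nodup
  disj   : ∀ p, p ∈ sorted → p ∈ queue → False
  subS   : ∀ p ∈ sorted, p ∈ pages
  subQ   : ∀ p ∈ queue, p ∈ pages
  deg    : ∀ p, indeg.getD p 0 = (WF pages F sorted p : Int)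
  zeroQ  : ∀ p ∈ pages, WF pages F sorted p = 0 → p ∈ sorted ∨ p ∈ queue
  qzero  : ∀ p ∈ queue, WF pages F sorted p = 0
  szero  : ∀ p ∈ sorted, WF pages F sorted p = 0
  topo   : ∀ pre x post, sorted = pre ++ x :: post → ∀ y ∈ pages, x ∈ F y → y ∈ pre

theorem kahnInv_step (pages : List Int) (F : Int → List Int)
    (hnp : pages.Nodup) (hF : ∀ y, ∀ p ∈ F y, p ∈ pages)
    (current : Int) (rest : List Int) (indeg : PySem.Dict Int Int) (sorted : List Int)
    (hJ : KahnInv pages F (current :: rest) indeg sorted) :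
    KahnInv pages F (kahnStep indeg rest (F current)).2 (kahnStep indeg rest (F current)).1
      (sorted ++ [current]) := by
  have hcp : current ∈ pages := hJ.subQ current List.mem_cons_self
  have hcs : current ∉ sorted := fun h => hJ.disj current h List.mem_cons_self
  have hW : ∀ p, WF pages F sorted p
      = WF pages F (sorted ++ [current]) p + (F current).count p :=
    WF_step pages F sorted current hnp hcp hcs
  have hWc : WF pages F sorted current = 0 := hJ.qzero current List.mem_cons_self
  have hmem2 : ∀ p, p ∈ (kahnStep indeg rest (F current)).2 ↔
      p ∈ rest ∨ (1 ≤ WF pages F sorted p ∧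
        WF pages F sorted p ≤ (F current).count p) := by
    intro p
    rw [← List.count_pos_iff, kahnStep_count, hJ.deg p]
    rcases Nat.eq_zero_or_pos (rest.count p) with h0 | h0
    · rw [h0]
      constructor
      · intro h
        right
        split at h
        · next hcond => exact ⟨by exact_mod_cast hcond.1, by exact_mod_cast hcond.2⟩
        · omega
      · intro h
        rcases h with h | h
        · rw [List.count_eq_zero] at h0; exact absurd h h0
        · rw [if_pos ⟨by exact_mod_cast h.1, by exact_mod_cast h.2⟩]; omega
    · constructor
      · intro _; left; exact List.count_pos_iff.mp h0
      · intro _; omega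
  have hrsub : ∀ p ∈ rest, p ∈ current :: rest := fun p hp => List.mem_cons_of_mem _ hp
  refine ⟨?_, ?_, ?_, ?_, ?_, ?_, ?_, ?_, ?_, ?_⟩
  · -- nodupS
    simp only [List.nodup_append, List.nodup_singleton]
    exact ⟨hJ.nodupS, trivial, by simp; exact fun a ha h => hcs (h ▸ ha)⟩
  · -- nodupQ
    rw [List.nodup_iff_count_le_one]
    intro p
    rw [kahnStep_count, hJ.deg p]
    split
    · next hcond =>
      have hp1 : 1 ≤ WF pages F sorted p := by exact_mod_cast hcond.1
      have hnr : p ∉ rest := fun hr => by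
        have := hJ.qzero p (hrsub p hr); omega
      rw [List.count_eq_zero.mpr hnr]
    · have := (List.nodup_cons.mp hJ.nodupQ).2
      have := List.nodup_iff_count_le_one.mp this p
      omega
  · -- disj
    intro p hps hpq
    rw [hmem2] at hpq
    rcases List.mem_append.mp hps with hps | hps
    · rcases hpq with h | h
      · exact hJ.disj p hps (hrsub p h)
      · have := hJ.szero p hps; omega
    · have hpc : p = current := by simpa using hps
      subst hpc
      rcases hpq with h | h
      · exact (List.nodup_cons.mp hJ.nodupQ).1 h
      · omega
  · -- subS
    intro p hp
    rcases List.mem_append.mp hp with h | h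
    · exact hJ.subS p h
    · have : p = current := by simpa using h
      subst this; exact hcp
  · -- subQ
    intro p hp
    rw [hmem2] at hp
    rcases hp with h | h
    · exact hJ.subQ p (hrsub p h)
    · have hcnt : 0 < (F current).count p := by omega
      exact hF current p (List.count_pos_iff.mp hcnt)
  · -- deg
    intro p
    rw [kahnStep_getD, hJ.deg p]
    have := hW p
    push_cast
    omega
  · -- zeroQ
    intro p hp hWp
    have hWs := hW p
    rcases Nat.eq_zero_or_pos (WF pages F sorted p) with h0 | h0
    · rcases hJ.zeroQ p hp h0 with h | h
      · exact Or.inl (List.mem_append.mpr (Or.inl h))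
      · rcases List.mem_cons.mp h with h | h
        · exact Or.inl (by simp [h])
        · exact Or.inr ((hmem2 p).mpr (Or.inl h))
    · exact Or.inr ((hmem2 p).mpr (Or.inr ⟨h0, by omega⟩))
  · -- qzero
    intro p hp
    rw [hmem2] at hp
    have hWs := hW p
    rcases hp with h | h
    · have := hJ.qzero p (hrsub p h); omega
    · omega
  · -- szero
    intro p hp
    have hWs := hW p
    rcases List.mem_append.mp hp with h | h
    · have := hJ.szero p h; omega
    · have : p = current := by simpa using h
      subst this; omega
  · -- topo
    intro pre x post hsp y hy hxy
    rcases append_singleton_eq_append_cons hsp with ⟨hpre, hx, -⟩ | ⟨post', -, hsorted⟩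
    · rw [hx] at hxy
      rw [hpre]
      by_contra hys
      exact WF_zero pages F sorted current hWc y hy hys hxy
    · exact hJ.topo pre x post' hsorted y hy hxy

theorem kahnLoop_out (pages : List Int) (F : Int → List Int)
    (hnp : pages.Nodup) (hF : ∀ y, ∀ p ∈ F y, p ∈ pages)
    (fg : PySem.Dict Int (List Int)) (hfg : ∀ x ∈ pages, fg.getD x [] = F x) :
    ∀ (queue : List Int) (indeg : PySem.Dict Int Int) (sorted : List Int),
      KahnInv pages F queue indeg sorted →
      (kahnLoop fg queue indeg sorted).Nodup ∧
      (∀ p ∈ kahnLoop fg queue indeg sorted, p ∈ pages) ∧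
      (∀ pre x post, kahnLoop fg queue indeg sorted = pre ++ x :: post →
         ∀ y ∈ pages, x ∈ F y → y ∈ pre) ∧
      (∀ p ∈ pages, p ∉ kahnLoop fg queue indeg sorted →
         ∃ y ∈ pages, y ∉ kahnLoop fg queue indeg sorted ∧ p ∈ F y) := by
  intro queue indeg sorted hJ
  induction queue, indeg, sorted using kahnLoop.induct fg with
  | case1 indeg sorted =>
    rw [kahnLoop]
    refine ⟨hJ.nodupS, hJ.subS, fun pre x post h => hJ.topo pre x post h, ?_⟩
    intro p hp hps
    have hW : WF pages F sorted p ≠ 0 := by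
      intro h0
      rcases hJ.zeroQ p hp h0 with h | h
      · exact hps h
      · simp at h
    -- extract a nonzero term
    unfold WF at hW
    have hne : ¬ ∀ t ∈ (pages.filter (fun x => !sorted.contains x)).map (fun x => (F x).count p), t = 0 :=
      fun hall => hW (List.sum_eq_zero_iff.mpr hall)
    rcases not_forall.mp hne with ⟨t, ht2⟩
    rcases Classical.not_imp.mp ht2 with ⟨ht, htne⟩
    rcases List.mem_map.mp ht with ⟨y, hyf, rfl⟩
    rcases List.mem_filter.mp hyf with ⟨hyp, hyns⟩
    refine ⟨y, hyp, ?_, List.count_pos_iff.mp (Nat.pos_of_ne_zero htne)⟩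
    simpa using hyns
  | case2 indeg sorted current rest st ih =>
    rw [kahnLoop]
    have hcp : current ∈ pages := hJ.subQ current List.mem_cons_self
    have hfgc : fg.getD current [] = F current := hfg current hcp
    have hst' : st = kahnStep indeg rest (F current) := by
      show kahnStep indeg rest (fg.getD current []) = _
      rw [hfgc]
    rw [hst'] at ih
    rw [hfgc]
    exact ih (kahnInv_step pages F hnp hF current rest indeg sorted hJ)

def adjG (graph : List (Int × List Int)) (y : Int) : List Int :=
  (PySem.Dict.mk graph).getD y []

def pagesOf (update : List Int) : List Int := PySem.Set.ofList update

def adjF (update : List Int) (graph : List (Int × List Int)) (y : Int) : List Int :=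
  (adjG graph y).filter (fun z => PySem.Set.contains (pagesOf update) z)

def HasCycle (update : List Int) (graph : List (Int × List Int)) : Prop :=
  ∃ R : List Int, R ≠ [] ∧ (∀ x ∈ R, x ∈ pagesOf update) ∧
    ∀ x ∈ R, ∃ y ∈ R, x ∈ adjF update graph y

theorem mem_of_contains (s : List Int) (x : Int) (h : PySem.Set.contains s x = true) : x ∈ s := by
  simpa using h

theorem contains_of_mem (s : List Int) (x : Int) (h : x ∈ s) : PySem.Set.contains s x = true := by
  simpa using h

theorem adjF_sub (update : List Int) (graph : List (Int × List Int)) :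
    ∀ y, ∀ p ∈ adjF update graph y, p ∈ pagesOf update := by
  intro y p hp
  exact mem_of_contains _ _ (List.of_mem_filter hp)

theorem getD_foldl_insert_fn {ν : Type} (f : Int → ν) (dflt : ν) :
    ∀ (xs : List Int) (d : PySem.Dict Int ν) (p : Int), xs.Nodup →
    (xs.foldl (fun d x => d.insert x (f x)) d).getD p dflt
      = if p ∈ xs then f p else d.getD p dflt := by
  intro xs
  induction xs with
  | nil => intro d p _; simp
  | cons x xs ih =>
    intro d p hnd
    rw [List.foldl_cons, ih _ p (List.nodup_cons.mp hnd).2]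
    by_cases hp : p ∈ xs
    · simp [hp]
    · rw [if_neg hp, PySem.Dict.getD_insert]
      by_cases hpx : p = x
      · simp [hpx]
      · simp [hpx, hp]

theorem getD_indeg_fold (G : Int → List Int) :
    ∀ (xs : List Int) (d : PySem.Dict Int Int) (p : Int),
    (xs.foldl (fun d x => (G x).foldl (fun d y => d.insert y (d.getD y 0 + 1)) d) d).getD p 0
      = d.getD p 0 + ((xs.map (fun x => (G x).count p)).sum : Int) := by
  intro xs
  induction xs with
  | nil => intro d p; simp
  | cons x xs ih =>
    intro d p
    rw [List.foldl_cons, ih, PySem.Dict.getD_foldl_insert_add_one, List.map_cons, List.sum_cons]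
    push_cast
    ring

def fgD (update : List Int) (graph : List (Int × List Int)) : PySem.Dict Int (List Int) :=
  (pagesOf update).foldl
    (fun d x => d.insert x (((PySem.Dict.mk graph).getD x []).filter
      (fun y => PySem.Set.contains (pagesOf update) y)))
    PySem.Dict.empty

def indeg0Of (update : List Int) : PySem.Dict Int Int :=
  (pagesOf update).foldl (fun d p => d.insert p (0 : Int)) PySem.Dict.empty

def indegOf (update : List Int) (graph : List (Int × List Int)) : PySem.Dict Int Int :=
  (fgD update graph).keys.foldl
    (fun d x => ((fgD update graph).getD x []).foldl (fun d y => d.insert y (d.getD y 0 + 1)) d)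
    (indeg0Of update)

def queueOf (update : List Int) (graph : List (Int × List Int)) : List Int :=
  (pagesOf update).filter (fun node => (indegOf update graph).getD node 0 == 0)

theorem nodup_pagesOf (update : List Int) : (pagesOf update).Nodup :=
  PySem.Set.nodup_ofList _

theorem fgD_getD (update : List Int) (graph : List (Int × List Int)) (x : Int) :
    (fgD update graph).getD x [] = if x ∈ pagesOf update then adjF update graph x else [] := by
  unfold fgD
  rw [getD_foldl_insert_fn _ _ _ _ _ (nodup_pagesOf update)]
  by_cases hx : x ∈ pagesOf update <;> simp [hx, adjF, adjG]

theorem fgD_keys (update : List Int) (graph : List (Int × List Int)) :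
    (fgD update graph).keys = pagesOf update := by
  unfold fgD
  rw [PySem.Dict.keys_foldl_insert]
  rw [PySem.Dict.keys_empty, PySem.Set.update_nil_left]
  exact PySem.Set.ofList_eq_self_of_nodup _ (nodup_pagesOf update)

theorem indeg0Of_getD (update : List Int) (p : Int) : (indeg0Of update).getD p 0 = 0 := by
  unfold indeg0Of
  rw [getD_foldl_insert_fn (fun _ => (0 : Int)) 0 _ _ _ (nodup_pagesOf update)]
  split <;> simp

theorem WF_nil (update : List Int) (graph : List (Int × List Int)) (p : Int) :
    WF (pagesOf update) (adjF update graph) [] p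
      = (((pagesOf update).map (fun x => (adjF update graph x).count p)).sum) := by
  unfold WF
  simp

theorem indegOf_getD (update : List Int) (graph : List (Int × List Int)) (p : Int) :
    (indegOf update graph).getD p 0
      = (WF (pagesOf update) (adjF update graph) [] p : Int) := by
  unfold indegOf
  rw [getD_indeg_fold, indeg0Of_getD, fgD_keys, WF_nil]
  rw [List.map_congr_left (fun x hx => by rw [fgD_getD, if_pos hx])]
  ring

theorem kahnInv_init (update : List Int) (graph : List (Int × List Int)) :
    KahnInv (pagesOf update) (adjF update graph) (queueOf update graph)
      (indegOf update graph) [] := by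
  refine ⟨List.nodup_nil, (nodup_pagesOf update).filter _, by simp, by simp, ?_, ?_, ?_, ?_, by simp, by simp⟩
  · intro p hp
    exact List.mem_of_mem_filter hp
  · intro p
    exact indegOf_getD update graph p
  · intro p hp h0
    right
    apply List.mem_filter.mpr
    refine ⟨hp, ?_⟩
    rw [indegOf_getD, h0]
    simp
  · intro p hp
    have := List.of_mem_filter hp
    rw [indegOf_getD] at this
    have h2 : (WF (pagesOf update) (adjF update graph) [] p : Int) = 0 := by
      simpa using this
    exact_mod_cast h2

theorem exists_first_mem (R : List Int) : ∀ (l : List Int), (∃ x ∈ l, x ∈ R) →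
    ∃ pre x post, l = pre ++ x :: post ∧ x ∈ R ∧ ∀ z ∈ pre, z ∉ R := by
  intro l
  induction l with
  | nil => intro h; simp at h
  | cons a l ih =>
    intro h
    by_cases ha : a ∈ R
    · exact ⟨[], a, l, rfl, ha, by simp⟩
    · have h2 : ∃ x ∈ l, x ∈ R := by
        rcases h with ⟨x, hxl, hxR⟩
        rcases List.mem_cons.mp hxl with rfl | hxl
        · exact absurd hxR ha
        · exact ⟨x, hxl, hxR⟩
      rcases ih h2 with ⟨pre, x, post, heq, hxR, hpre⟩
      refine ⟨a :: pre, x, post, by simp [heq], hxR, ?_⟩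
      intro z hz
      rcases List.mem_cons.mp hz with rfl | hz
      · exact ha
      · exact hpre z hz

theorem A_iff (update : List Int) (graph : List (Int × List Int)) :
    is_update_valid update graph = true ↔ ¬ HasCycle update graph := by
  have hrfl : is_update_valid update graph
      = ((kahnLoop (fgD update graph) (queueOf update graph) (indegOf update graph) []).length
          == (pagesOf update).length) := rfl
  obtain ⟨hnodup, hsub, htopo, hstuck⟩ :=
    kahnLoop_out (pagesOf update) (adjF update graph) (nodup_pagesOf update)
      (adjF_sub update graph) (fgD update graph)
      (fun x hx => by rw [fgD_getD, if_pos hx])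
      (queueOf update graph) (indegOf update graph) [] (kahnInv_init update graph)
  set out := kahnLoop (fgD update graph) (queueOf update graph) (indegOf update graph) []
    with hout
  constructor
  · intro htrue hP
    rcases hP with ⟨R, hRne, hRsub, hRss⟩
    have hlen : out.length = (pagesOf update).length := by
      rw [hrfl] at htrue
      simpa using htrue
    have hperm : out.Perm (pagesOf update) :=
      (hnodup.subperm (fun _ h => hsub _ h)).perm_of_length_le (le_of_eq hlen.symm)
    have hpm : ∀ x ∈ pagesOf update, x ∈ out := fun x hx => hperm.mem_iff.mpr hx
    rcases List.exists_mem_of_ne_nil R hRne with ⟨x0, hx0⟩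
    rcases exists_first_mem R out ⟨x0, hpm x0 (hRsub x0 hx0), hx0⟩ with
      ⟨pre, x, post, heq, hxR, hpre⟩
    rcases hRss x hxR with ⟨y, hyR, hxy⟩
    exact hpre y (htopo pre x post heq y (hRsub y hyR) hxy) hyR
  · intro hnc
    rw [hrfl]
    by_contra hne
    have hlenne : out.length ≠ (pagesOf update).length := fun h => hne (by simp [h])
    have hex : ∃ p ∈ pagesOf update, p ∉ out := by
      by_contra hall
      have hall2 : ∀ p ∈ pagesOf update, p ∈ out := by
        intro p hp
        rcases not_exists.mp hall p with h
        exact Classical.byContradiction (fun hno => h ⟨hp, hno⟩)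
      have h1 : out.length ≤ (pagesOf update).length :=
        (hnodup.subperm (fun _ h => hsub _ h)).length_le
      have h2 : (pagesOf update).length ≤ out.length :=
        ((nodup_pagesOf update).subperm (fun _ h => hall2 _ h)).length_le
      exact hlenne (Nat.le_antisymm h1 h2)
    rcases hex with ⟨p0, hp0, hp0n⟩
    apply hnc
    refine ⟨(pagesOf update).filter (fun x => !out.contains x), ?_, ?_, ?_⟩
    · intro h
      have : p0 ∈ (pagesOf update).filter (fun x => !out.contains x) := by
        simp [List.mem_filter, hp0, hp0n]
      rw [h] at this
      simp at this
    · intro x hx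
      exact List.mem_of_mem_filter hx
    · intro x hx
      have hxp : x ∈ pagesOf update := List.mem_of_mem_filter hx
      have hxn : x ∉ out := by
        have := List.of_mem_filter hx
        simpa using this
      rcases hstuck x hxp hxn with ⟨y, hyp, hyn, hxy⟩
      exact ⟨y, by simp [List.mem_filter, hyp, hyn], hxy⟩

def preds0Of (update : List Int) : PySem.Dict Int (List Int) :=
  (pagesOf update).foldl (fun d x => d.insert x ([] : List Int)) PySem.Dict.empty

def predsOf (update : List Int) (graph : List (Int × List Int)) : PySem.Dict Int (List Int) :=
  (pagesOf update).foldl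
    (fun d y => ((PySem.Dict.mk graph).getD y []).foldl
      (fun d x => if PySem.Set.contains (pagesOf update) x then d.modify x [] (· ++ [y]) else d) d)
    (preds0Of update)

theorem preds_inner_getD (update : List Int) (y : Int) :
    ∀ (l : List Int) (d : PySem.Dict Int (List Int)) (x : Int),
    (l.foldl (fun d z => if PySem.Set.contains (pagesOf update) z
        then d.modify z [] (· ++ [y]) else d) d).getD x []
      = d.getD x [] ++ List.replicate
          (if PySem.Set.contains (pagesOf update) x then l.count x else 0) y := by
  intro l
  induction l with
  | nil => intro d x; simp
  | cons z l ih =>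
    intro d x
    rw [List.foldl_cons]
    by_cases hz : PySem.Set.contains (pagesOf update) z = true
    · rw [if_pos hz, ih, PySem.Dict.getD_modify]
      by_cases hxz : x = z
      · subst hxz
        have hz' : x ∈ pagesOf update := by simpa using hz
        simp [hz', List.count_cons_self, List.replicate_succ, List.append_assoc]
      · have hcc : List.count x (z :: l) = List.count x l := by simp [Ne.symm hxz]
        simp [hxz, hcc]
    · rw [if_neg hz, ih]
      by_cases hxz : x = z
      · subst hxz
        have hz' : x ∉ pagesOf update := by simpa using hz
        simp [hz']
      · have hcc : List.count x (z :: l) = List.count x l := by simp [Ne.symm hxz]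
        simp [hcc]

theorem preds0Of_getD (update : List Int) (x : Int) : (preds0Of update).getD x [] = [] := by
  unfold preds0Of
  rw [getD_foldl_insert_fn (fun _ => ([] : List Int)) [] _ _ _ (nodup_pagesOf update)]
  split <;> simp

theorem predsOf_mem (update : List Int) (graph : List (Int × List Int)) :
    ∀ (ys : List Int) (d : PySem.Dict Int (List Int)) (x z : Int),
    (z ∈ ((ys.foldl (fun d y => ((PySem.Dict.mk graph).getD y []).foldl
        (fun d x => if PySem.Set.contains (pagesOf update) x then d.modify x [] (· ++ [y]) else d) d)
        d).getD x []) ↔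
      z ∈ d.getD x [] ∨ (z ∈ ys ∧ PySem.Set.contains (pagesOf update) x = true ∧ x ∈ adjG graph z)) := by
  intro ys
  induction ys with
  | nil => intro d x z; simp
  | cons y ys ih =>
    intro d x z
    rw [List.foldl_cons, ih, preds_inner_getD, List.mem_append]
    constructor
    · rintro ((h | h) | h)
      · exact Or.inl h
      · rcases List.mem_replicate.mp h with ⟨hne, rfl⟩
        split at hne
        · next hc =>
          refine Or.inr ⟨List.mem_cons_self, hc, ?_⟩
          rw [← List.count_pos_iff]
          unfold adjG
          omega
        · omega
      · exact Or.inr ⟨List.mem_cons_of_mem _ h.1, h.2.1, h.2.2⟩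
    · rintro (h | ⟨hzy, hcx, hadj⟩)
      · exact Or.inl (Or.inl h)
      · rcases List.mem_cons.mp hzy with rfl | hzy
        · left; right
          rw [List.mem_replicate]
          rw [if_pos hcx]
          refine ⟨?_, rfl⟩
          have : 0 < ((PySem.Dict.mk graph).getD z []).count x := List.count_pos_iff.mpr hadj
          omega
        · exact Or.inr ⟨hzy, hcx, hadj⟩

theorem predsOf_getD_mem (update : List Int) (graph : List (Int × List Int)) (x z : Int) :
    z ∈ (predsOf update graph).getD x [] ↔
      z ∈ pagesOf update ∧ PySem.Set.contains (pagesOf update) x = true ∧ x ∈ adjG graph z := by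
  unfold predsOf
  rw [predsOf_mem, preds0Of_getD]
  simp

theorem peel_true (update : List Int) (graph : List (Int × List Int)) :
    ∀ (n : Nat) (remaining : List Int), remaining.length ≤ n →
    (∀ x ∈ remaining, x ∈ pagesOf update) →
    peelLoop (predsOf update graph) remaining = true →
    ∀ R, R ≠ [] → (∀ x ∈ R, x ∈ remaining) →
      (∀ x ∈ R, ∃ y ∈ R, x ∈ adjF update graph y) → False := by
  intro n
  induction n with
  | zero =>
    intro remaining hle _ _ R hRne hRsub _
    rcases List.exists_mem_of_ne_nil R hRne with ⟨x, hx⟩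
    have := hRsub x hx
    rw [List.length_eq_zero_iff.mp (Nat.le_zero.mp hle)] at this
    simp at this
  | succ n ih =>
    intro remaining hle hsub htrue R hRne hRsub hRss
    rw [peelLoop] at htrue
    by_cases hemp : remaining.isEmpty = true
    · rcases List.exists_mem_of_ne_nil R hRne with ⟨x, hx⟩
      have := hRsub x hx
      rw [List.isEmpty_iff.mp hemp] at this
      simp at this
    · rw [if_neg hemp] at htrue
      by_cases hlen : (remaining.filter (fun x => ((predsOf update graph).getD x []).any
          (fun y => remaining.contains y))).length = remaining.length
      · rw [dif_pos hlen] at htrue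
        exact absurd htrue (by simp)
      · rw [dif_neg hlen] at htrue
        have hlt : (remaining.filter (fun x => ((predsOf update graph).getD x []).any
            (fun y => remaining.contains y))).length < remaining.length :=
          Nat.lt_of_le_of_ne (List.length_filter_le _ _) hlen
        apply ih _ (by omega) (fun x hx => hsub x (List.mem_of_mem_filter hx)) htrue
          R hRne ?_ hRss
        intro x hx
        apply List.mem_filter.mpr
        refine ⟨hRsub x hx, ?_⟩
        apply List.any_eq_true.mpr
        rcases hRss x hx with ⟨y, hyR, hxy⟩
        refine ⟨y, ?_, by simpa using hRsub y hyR⟩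
        rw [predsOf_getD_mem]
        have hxp : x ∈ pagesOf update := hsub x (hRsub x hx)
        rcases List.mem_filter.mp hxy with ⟨hadj, -⟩
        exact ⟨hsub y (hRsub y hyR), contains_of_mem _ _ hxp, hadj⟩

theorem peel_false (update : List Int) (graph : List (Int × List Int)) :
    ∀ (n : Nat) (remaining : List Int), remaining.length ≤ n →
    (∀ x ∈ remaining, x ∈ pagesOf update) →
    peelLoop (predsOf update graph) remaining = false →
    HasCycle update graph := by
  intro n
  induction n with
  | zero =>
    intro remaining hle _ hfalse
    rw [List.length_eq_zero_iff.mp (Nat.le_zero.mp hle)] at hfalse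
    rw [peelLoop] at hfalse
    simp at hfalse
  | succ n ih =>
    intro remaining hle hsub hfalse
    rw [peelLoop] at hfalse
    by_cases hemp : remaining.isEmpty = true
    · rw [if_pos hemp] at hfalse
      exact absurd hfalse (by simp)
    · rw [if_neg hemp] at hfalse
      by_cases hlen : (remaining.filter (fun x => ((predsOf update graph).getD x []).any
          (fun y => remaining.contains y))).length = remaining.length
      · refine ⟨remaining, fun h => hemp (by simp [h]), hsub, ?_⟩
        intro x hx
        have hall := List.length_filter_eq_length_iff.mp hlen x hx
        rcases List.any_eq_true.mp hall with ⟨y, hyp, hyr⟩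
        rcases (predsOf_getD_mem update graph x y).mp hyp with ⟨hypg, hcx, hadj⟩
        refine ⟨y, by simpa using hyr, ?_⟩
        exact List.mem_filter.mpr ⟨hadj, hcx⟩
      · rw [dif_neg hlen] at hfalse
        have hlt : (remaining.filter (fun x => ((predsOf update graph).getD x []).any
            (fun y => remaining.contains y))).length < remaining.length :=
          Nat.lt_of_le_of_ne (List.length_filter_le _ _) hlen
        exact ih _ (by omega) (fun x hx => hsub x (List.mem_of_mem_filter hx)) hfalse

theorem B_iff (update : List Int) (graph : List (Int × List Int)) :
    is_update_valid_alt update graph = true ↔ ¬ HasCycle update graph := by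
  have hrfl : is_update_valid_alt update graph
      = peelLoop (predsOf update graph) (pagesOf update) := rfl
  rw [hrfl]
  constructor
  · intro htrue hc
    rcases hc with ⟨R, hRne, hRsub, hRss⟩
    exact peel_true update graph (pagesOf update).length (pagesOf update) le_rfl
      (fun x hx => hx) htrue R hRne hRsub hRss
  · intro hnc
    cases hb : peelLoop (predsOf update graph) (pagesOf update) with
    | false =>
      exact absurd (peel_false update graph (pagesOf update).length (pagesOf update) le_rfl
        (fun x hx => hx) hb) hnc
    | true => rfl

theorem main_eq (update : List Int) (graph : List (Int × List Int)) :
    is_update_valid update graph = is_update_valid_alt update graph :=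
  Bool.eq_iff_iff.mpr ((A_iff update graph).trans (B_iff update graph).symm)

-- ===== VERDICT (by name: the statement is the Claim_ definition above) =====
theorem is_update_valid_spec : Claim_equal_is_update_valid := by
  intro update graph _ _
  exact main_eq update graph
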